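-- pv_equiv track=rewrite | github.com/mfaramarzi/Internship_Summer2021 | masoud/generators/+Conformity/New Text Document.py | generateCase
-- ===== SOURCE A (Python) =====
-- def generateCase(case, num_stu, course_lst): # generating a dic containing case, input, and result strings
--
-- #course_lst is 3-d list and will be 2-d for each of 50 cases
--
--     comb_cours_lst = [] #list of unique combinations of course
--
--     new_case = {}
--
--     new_case["case"] = case
--
--     new_case["input"] = str(num_stu) + " ".join([str(i) for i in course_lst]) # "i" is list of int initially.
--
--
--     for i in course_lst:
--
--         if i not in comb_cours_lst:
--
--             comb_cours_lst.append(i)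
--
--     uniq_comb = len(comb_cours_lst)
--
--     new_case["output"] = str(uniq_comb) #converting result from int to str
--
--     return new_case
-- ===== SOURCE B (Python) =====
-- def generateCase(case, num_stu, course_lst):
--     # Different decomposition: build the repr parts with an explicit loop,
--     # count unique combinations by one pass over the sorted list tracking the
--     # previous element, and return the dict as a single literal.
--     parts = []
--     for i in course_lst:
--         parts.append("[" + ", ".join(str(x) for x in i) + "]")
--     uniq = 0
--     prev = None
--     for c in sorted(course_lst):
--         if prev is None or c != prev:
--             uniq += 1
--         prev = c
--     return {"case": case,
--             "input": str(num_stu) + " ".join(parts),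
--             "output": str(uniq)}
-- ===== Notes on version B (the rewrite author's own statement) =====
-- stated objective: alternative
-- what changed: B sorts the list once and counts distinct runs in a single pass tracking the previous element (instead of A's membership scan over a growing list), builds the input-string parts with an explicit loop, and returns the dict as one literal instead of key-by-key insertion.
import Mathlib
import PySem

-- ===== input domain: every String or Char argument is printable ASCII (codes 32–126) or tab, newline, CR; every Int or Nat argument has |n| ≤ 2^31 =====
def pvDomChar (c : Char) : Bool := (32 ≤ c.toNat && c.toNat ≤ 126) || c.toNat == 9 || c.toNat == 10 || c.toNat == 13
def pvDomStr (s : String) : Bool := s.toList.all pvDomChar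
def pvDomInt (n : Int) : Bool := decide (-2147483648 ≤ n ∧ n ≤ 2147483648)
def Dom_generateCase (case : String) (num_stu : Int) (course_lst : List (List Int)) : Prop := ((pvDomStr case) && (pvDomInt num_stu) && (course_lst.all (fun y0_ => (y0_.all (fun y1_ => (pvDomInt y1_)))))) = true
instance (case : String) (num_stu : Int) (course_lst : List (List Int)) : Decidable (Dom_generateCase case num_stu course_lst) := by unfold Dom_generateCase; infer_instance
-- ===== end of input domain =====

-- B sorts the course list once and counts distinct runs in one pass (tracking the previous
-- element) instead of A's membership scan over a growing list, and builds the dict as a literal.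


-- ===== PORT A =====
-- str(i) for a Python list of ints: "[" + ", ".join(str-of-elements) + "]"  (exact for int lists)
def pyListRepr (i : List Int) : String :=
  PySem.Str.join "" ["[", PySem.Str.join ", " (i.map PySem.Int.toStr), "]"]

def generateCase (case : String) (num_stu : Int) (course_lst : List (List Int)) : List (String × String) :=
  let new_case : PySem.Dict String String := PySem.Dict.empty
  let new_case := new_case.insert "case" case
  let new_case := new_case.insert "input"
    (PySem.Str.join "" [PySem.Int.toStr num_stu, PySem.Str.join " " (course_lst.map pyListRepr)])
  -- for i in course_lst: if i not in comb_cours_lst: comb_cours_lst.append(i)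
  let comb_cours_lst : List (List Int) :=
    course_lst.foldl (fun acc i => if i ∈ acc then acc else acc ++ [i]) []
  let uniq_comb : Int := comb_cours_lst.length
  let new_case := new_case.insert "output" (PySem.Int.toStr uniq_comb)
  new_case.items

-- ===== PORT B =====
def generateCase_alt (case : String) (num_stu : Int) (course_lst : List (List Int)) : List (String × String) :=
  -- parts = []; for i in course_lst: parts.append("[" + ", ".join(str(x) for x in i) + "]")
  let parts : List String :=
    course_lst.foldl
      (fun ps i => ps ++ [PySem.Str.join "" ["[", PySem.Str.join ", " (i.map PySem.Int.toStr), "]"]]) []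
  -- uniq = 0; prev = None; for c in sorted(course_lst): if prev is None or c != prev: uniq += 1; prev = c
  let st : Int × Option (List Int) :=
    (PySem.List.sorted course_lst (fun x => x) false).foldl
      (fun st c => (if st.2 = none ∨ c ≠ (st.2).getD [] then st.1 + 1 else st.1, some c)) (0, none)
  [("case", case),
   ("input", PySem.Str.join "" [PySem.Int.toStr num_stu, PySem.Str.join " " parts]),
   ("output", PySem.Int.toStr st.1)]

-- ===== PRECONDITION & SPEC =====
def Spec_generateCase (case : String) (num_stu : Int) (course_lst : List (List Int)) (out : List (String × String)) : Prop := out = generateCase_alt case num_stu course_lst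
instance (case : String) (num_stu : Int) (course_lst : List (List Int)) (out : List (String × String)) : Decidable (Spec_generateCase case num_stu course_lst out) := by unfold Spec_generateCase; infer_instance

-- ===== CLAIM (what is proved, stated in full; the proofs are below) =====
def Claim_equal_generateCase : Prop := ∀ (case : String) (num_stu : Int) (course_lst : List (List Int)), Dom_generateCase case num_stu course_lst → Spec_generateCase case num_stu course_lst (generateCase case num_stu course_lst)

-- ===== LEMMAS AND PROOFS =====

-- A's accumulating loop is exactly set-of-list building; its length is the number of distinct elements.
theorem countA_eq_card (l : List (List Int)) :
    ((l.foldl (fun acc i => if i ∈ acc then acc else acc ++ [i]) []).length : Int)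
      = (l.toFinset.card : Int) := by
  have hfun : l.foldl (fun acc i => if i ∈ acc then acc else acc ++ [i]) []
      = l.foldl PySem.Set.add [] := by
    refine PySem.List.foldl_congr_mem l _ _ _ (fun acc x _ => ?_)
    simp [PySem.Set.add, PySem.Set.contains]
  have hof : l.foldl PySem.Set.add [] = PySem.Set.ofList l :=
    (PySem.Set.ofList_eq_foldl l).symm
  have hfin : (PySem.Set.ofList l).toFinset = l.toFinset := by
    apply Finset.ext; intro x; simp [List.mem_toFinset, PySem.Set.mem_ofList]
  have hnd : (PySem.Set.ofList l).Nodup := PySem.Set.nodup_ofList l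
  have hlen : (PySem.Set.ofList l).length = l.toFinset.card := by
    rw [← hfin]; exact (List.toFinset_card_of_nodup hnd).symm
  rw [hfun, hof]; exact_mod_cast hlen

-- B's prev-tracking fold, started at (n, some a), adds the number of adjacent distinct pairs of a::t.
theorem prevFold_eq_countP (t : List (List Int)) (n : Int) (a : List Int) :
    (t.foldl (fun st c => (if st.2 = none ∨ c ≠ (st.2).getD [] then st.1 + 1 else st.1, some c))
      ((n, some a) : Int × Option (List Int))).1
      = n + (((a :: t).zip t).countP (fun p => p.1 ≠ p.2)) := by
  induction t generalizing n a with
  | nil => simp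
  | cons b t' ih =>
    simp only [List.foldl_cons, List.zip_cons_cons, List.countP_cons, ih]
    by_cases hab : a = b
    · subst hab; simp
    · simp only [Option.getD_some]
      have : ((some a : Option (List Int)) = none ∨ b ≠ a) := Or.inr (Ne.symm hab)
      rw [if_pos this]
      have hd : (decide (a ≠ b)) = true := by simpa using hab
      simp only [hd]
      push_cast
      ring

-- On a ≤-sorted nonempty list, 1 + (number of adjacent distinct pairs) is the number of distinct elements.
theorem runCount_eq_card (s : List (List Int)) (h : s.Pairwise (· ≤ ·)) :
    (if s.isEmpty then (0 : Int) else 1 + (s.zip (s.drop 1)).countP (fun p => p.1 ≠ p.2))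
      = (s.toFinset.card : Int) := by
  induction s with
  | nil => simp
  | cons a t ih =>
    cases t with
    | nil => simp
    | cons b t' =>
      rw [List.pairwise_cons] at h
      obtain ⟨hab, ht⟩ := h
      have ihv := ih ht
      simp only [List.isEmpty_cons, Bool.false_eq_true, if_false, List.drop_succ_cons,
        List.drop_zero, List.zip_cons_cons, List.countP_cons] at ihv ⊢
      by_cases hieq : a = b
      · subst hieq
        have hfs : (a :: a :: t').toFinset = (a :: t').toFinset := by
          simp [List.toFinset_cons]
        rw [hfs]
        simp only [ne_eq, not_true_eq_false, decide_false, Bool.false_eq_true, if_false, add_zero]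
        omega
      · have hlt : a < b := lt_of_le_of_ne (hab b (by simp)) hieq
        have hnotmem : a ∉ (b :: t').toFinset := by
          rw [List.pairwise_cons] at ht
          simp only [List.mem_toFinset, List.mem_cons]
          rintro (rfl | hx)
          · exact absurd rfl (ne_of_lt hlt)
          · exact absurd rfl (ne_of_lt (lt_of_lt_of_le hlt (ht.1 a hx)))
        have hcard : (a :: b :: t').toFinset.card = (b :: t').toFinset.card + 1 := by
          rw [List.toFinset_cons, Finset.card_insert_of_notMem hnotmem]
        rw [hcard]
        have hd : (decide (a ≠ b)) = true := by simpa using hieq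
        simp only [hd, if_true]
        push_cast at ihv ⊢
        omega

theorem sortLL_pairwise (l : List (List Int)) :
    (PySem.List.sorted l (fun x => x) false).Pairwise (· ≤ ·) := by
  have h := PySem.List.sorted_pairwise (κ := List Int) l (fun x => x)
  have e : @PySem.List.sorted (List Int) (List Int) List.instLinearOrder.toLT
      LinearOrder.toDecidableLT l (fun x => x) false = PySem.List.sorted l (fun x => x) false := by
    congr 1
  rw [e] at h; exact h

theorem counts_agree (l : List (List Int)) :
    ((l.foldl (fun acc i => if i ∈ acc then acc else acc ++ [i]) []).length : Int)
      = ((PySem.List.sorted l (fun x => x) false).foldl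
          (fun st c => (if st.2 = none ∨ c ≠ (st.2).getD [] then st.1 + 1 else st.1, some c))
          ((0, none) : Int × Option (List Int))).1 := by
  have hperm : (PySem.List.sorted l (fun x => x) false).Perm l := PySem.List.sorted_perm l _ false
  have hfin : (PySem.List.sorted l (fun x => x) false).toFinset = l.toFinset :=
    List.toFinset_eq_of_perm _ _ hperm
  rw [countA_eq_card, ← hfin]
  cases hs : PySem.List.sorted l (fun x => x) false with
  | nil => simp
  | cons a t =>
    have hpw : (a :: t).Pairwise (fun x y : List Int => x ≤ y) := by
      rw [← hs]; exact sortLL_pairwise l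
    have hrun := runCount_eq_card (a :: t) hpw
    simp only [List.isEmpty_cons, Bool.false_eq_true, if_false, List.drop_succ_cons,
      List.drop_zero] at hrun
    rw [← hrun]
    simp only [List.foldl_cons]
    simp only [true_or, if_true, zero_add]
    rw [prevFold_eq_countP t 1 a]

-- ===== VERDICT (by name: the statement is the Claim_ definition above) =====
theorem generateCase_spec : Claim_equal_generateCase := by
  intro case num_stu course_lst _
  simp only [Spec_generateCase, generateCase, generateCase_alt]
  rw [PySem.List.foldl_append_singleton_eq_map, ← counts_agree course_lst]
  rfl
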